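-- pv_equiv track=rewrite | github.com/PLSE-Lab/Python-MLAPI-expl | python_sources/tag-insert-performance-comparison.py | tag_insert_join3
-- ===== SOURCE A (Python) =====
-- from operator import itemgetter
--
-- def tag_insert_join3(text, tag_list):
--     tag_list.sort(key=itemgetter(0))
--     def segs_generator():
--         for (offset, tag), (offset2, _) in zip(tag_list, tag_list[1:]):
--             yield tag
--             yield text[offset:offset2]
--     last_offset, last_tag = tag_list[-1]
--     segs_to_join = [text[:tag_list[0][0]], *segs_generator(), last_tag, text[last_offset:]]
--     return ''.join(segs_to_join)
-- ===== SOURCE B (Python) =====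
-- def tag_insert_join3(text, tag_list):
--     tag_list.sort(key=lambda p: p[0])
--     n = len(tag_list)
--     def chunk(lo, hi):
--         if hi - lo == 1:
--             offset, tag = tag_list[lo]
--             end = tag_list[lo + 1][0] if lo + 1 < n else None
--             return tag + text[offset:end]
--         mid = (lo + hi) // 2
--         return chunk(lo, mid) + chunk(mid, hi)
--     return text[:tag_list[0][0]] + chunk(0, n)
-- ===== Notes on version B (the rewrite author's own statement) =====
-- stated objective: alternative
-- what changed: Replaces A's linear zip-over-consecutive-pairs generator with separate first/last boundary cases by a balanced divide-and-conquer over the sorted tag indices: each leaf emits its tag plus the text slice up to the next tag's offset, halves are concatenated.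
import Mathlib
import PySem

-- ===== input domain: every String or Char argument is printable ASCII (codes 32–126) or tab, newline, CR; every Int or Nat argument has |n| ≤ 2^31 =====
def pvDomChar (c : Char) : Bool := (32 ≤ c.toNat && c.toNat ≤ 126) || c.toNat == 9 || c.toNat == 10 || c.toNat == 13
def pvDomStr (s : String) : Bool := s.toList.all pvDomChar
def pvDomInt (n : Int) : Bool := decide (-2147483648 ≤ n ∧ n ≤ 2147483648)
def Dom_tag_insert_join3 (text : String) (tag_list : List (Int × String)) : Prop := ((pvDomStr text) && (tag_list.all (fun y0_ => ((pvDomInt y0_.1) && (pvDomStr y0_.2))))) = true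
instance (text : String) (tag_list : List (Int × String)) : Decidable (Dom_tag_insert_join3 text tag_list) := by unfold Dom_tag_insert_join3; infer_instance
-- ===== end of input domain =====

-- Re-implementation B: after sorting, build the result by balanced divide-and-conquer over the
-- tag indices (each leaf emits its tag plus the slice up to the next tag's offset) instead of A's
-- linear zip-over-consecutive-pairs generator with separate boundary cases ('alternative').
-- Both A and B sort tag_list in place; the equivalence proved here is about the return value.


-- ===== PORT A =====
-- tag_list.sort(key=itemgetter(0)); zip consecutive pairs yielding tag then the slice
-- between the two offsets; prepend text[:first offset], append last tag and text[last offset:].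
def tag_insert_join3 (text : String) (tag_list : List (Int × String)) : String :=
  match PySem.List.sorted tag_list (fun p => p.1) false with
  | [] => ""  -- Python: tag_list[-1] raises IndexError here (excluded by Pre_)
  | hd :: rest =>
    let tl := hd :: rest
    let t := text.toList
    let lastp := tl.getLast (List.cons_ne_nil _ _)
    let segs : List (List Char) :=
      PySem.List.slice t none (some hd.1)
        :: (tl.zip rest).flatMap
            (fun pp => [pp.1.2.toList, PySem.List.slice t (some pp.1.1) (some pp.2.1)])
        ++ [lastp.2.toList, PySem.List.slice t (some lastp.1) none]
    String.ofList segs.flatten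

-- ===== PORT B =====
-- chunk(lo, hi): for the index range [lo, hi) of the sorted list, a leaf (hi - lo == 1) returns
-- tag + text[offset : next tag's offset or end]; otherwise split at mid and concatenate halves.
-- (The 0 branch of the match is unreachable in B's calls; it only makes the recursion total.)
def pvChunk (t : List Char) (tl : List (Int × String)) (n lo hi : Nat) : List Char :=
  match h : hi - lo with
  | 0 => []
  | 1 =>
    let p := tl.getD lo (0, "")
    let e : Option Int := if lo + 1 < n then some (tl.getD (lo + 1) (0, "")).1 else none
    p.2.toList ++ PySem.List.slice t (some p.1) e
  | Nat.succ (Nat.succ _) =>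
    let mid := (lo + hi) / 2
    pvChunk t tl n lo mid ++ pvChunk t tl n mid hi
termination_by hi - lo
decreasing_by all_goals omega

def tag_insert_join3_alt (text : String) (tag_list : List (Int × String)) : String :=
  let tl := PySem.List.sorted tag_list (fun p => p.1) false
  let t := text.toList
  let n := tl.length
  match PySem.List.pyGet? tl 0 with
  | none => ""  -- Python: tag_list[0] raises IndexError here (excluded by Pre_)
  | some p0 => String.ofList (PySem.List.slice t none (some p0.1) ++ pvChunk t tl n 0 n)

-- ===== PRECONDITION & SPEC =====
-- Both programs raise IndexError on an empty tag list (A at tag_list[-1], B at tag_list[0]);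
-- nothing else raises.
def Pre_tag_insert_join3 (text : String) (tag_list : List (Int × String)) : Prop := tag_list ≠ []
instance (text : String) (tag_list : List (Int × String)) : Decidable (Pre_tag_insert_join3 text tag_list) := by unfold Pre_tag_insert_join3; infer_instance
def pvWitness_tag_insert_join3 : String × (List (Int × String)) := ("hello", [(2, "<b>"), (4, "</b>")])
def Spec_tag_insert_join3 (text : String) (tag_list : List (Int × String)) (out : String) : Prop := out = tag_insert_join3_alt text tag_list
instance (text : String) (tag_list : List (Int × String)) (out : String) : Decidable (Spec_tag_insert_join3 text tag_list out) := by unfold Spec_tag_insert_join3; infer_instance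

-- ===== CLAIM (what is proved, stated in full; the proofs are below) =====
def Claim_equal_tag_insert_join3 : Prop := ∀ (text : String) (tag_list : List (Int × String)), Dom_tag_insert_join3 text tag_list → Pre_tag_insert_join3 text tag_list → Spec_tag_insert_join3 text tag_list (tag_insert_join3 text tag_list)

-- ===== LEMMAS AND PROOFS =====

-- The chunk produced for index k, seen as a function of k (proof-side abbreviation).
def pvPiece (t : List Char) (tl : List (Int × String)) (n k : Nat) : List Char :=
  (tl.getD k (0, "")).2.toList
    ++ PySem.List.slice t (some (tl.getD k (0, "")).1)
        (if k + 1 < n then some (tl.getD (k + 1) (0, "")).1 else none)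

-- B's divide-and-conquer over [lo, lo+d) is the concatenation of the pieces for lo, …, lo+d-1.
-- Reduction equations for pvChunk's three match arms, phrased on hi - lo.
lemma pvChunk_zero (t : List Char) (tl : List (Int × String)) (n lo hi : Nat)
    (h : hi - lo = 0) : pvChunk t tl n lo hi = [] := by
  conv_lhs => rw [pvChunk.eq_def]
  split <;> first | rfl | omega

lemma pvChunk_one (t : List Char) (tl : List (Int × String)) (n lo hi : Nat)
    (h : hi - lo = 1) : pvChunk t tl n lo hi =
      (tl.getD lo (0, "")).2.toList ++ PySem.List.slice t (some (tl.getD lo (0, "")).1)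
        (if lo + 1 < n then some (tl.getD (lo + 1) (0, "")).1 else none) := by
  conv_lhs => rw [pvChunk.eq_def]
  split <;> first | rfl | omega

lemma pvChunk_split (t : List Char) (tl : List (Int × String)) (n lo hi : Nat)
    (h : 2 ≤ hi - lo) : pvChunk t tl n lo hi =
      pvChunk t tl n lo ((lo + hi) / 2) ++ pvChunk t tl n ((lo + hi) / 2) hi := by
  conv_lhs => rw [pvChunk.eq_def]
  split <;> first | rfl | omega

lemma pvChunk_eq (t : List Char) (tl : List (Int × String)) (n : Nat) :
    ∀ d lo, pvChunk t tl n lo (lo + d) = (List.range' lo d).flatMap (pvPiece t tl n) := by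
  intro d
  induction d using Nat.strong_induction_on with
  | _ d ih =>
    intro lo
    match hd : d with
    | 0 => rw [pvChunk_zero t tl n lo (lo + 0) (by omega)]; simp
    | 1 => rw [pvChunk_one t tl n lo (lo + 1) (by omega)]; simp [pvPiece]
    | Nat.succ (Nat.succ e) =>
      rw [pvChunk_split t tl n lo (lo + (e + 2)) (by omega)]
      have hmid : (lo + (lo + (e + 2))) / 2 = lo + (e + 2) / 2 := by omega
      have h1 : (e + 2) / 2 < e + 2 := by omega
      have h2 : (e + 2) - (e + 2) / 2 < e + 2 := by omega
      have h3 : lo + (e + 2) = (lo + (e + 2) / 2) + ((e + 2) - (e + 2) / 2) := by omega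
      rw [hmid, ih _ h1 lo, h3, ih _ h2 (lo + (e + 2) / 2)]
      have h4 : (e + 2) / 2 + ((e + 2) - (e + 2) / 2) = e + 2 := by omega
      rw [← List.flatMap_append, List.range'_append_1, h4]

-- Flattening a list of two-element segment lists is the concatenation of the pairs.
lemma pvFlatMap_pair_flatten {α : Type} (l : List α) (f g : α → List Char) :
    (l.flatMap (fun x => [f x, g x])).flatten = l.flatMap (fun x => f x ++ g x) := by
  induction l with
  | nil => rfl
  | cons x xs ih => simp [ih]

-- zip of a list with its own tail, as a map over indices.
lemma pvZip_tail_eq_range (hd : Int × String) (rest : List (Int × String)) :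
    (hd :: rest).zip rest
      = (List.range' 0 rest.length).map
          (fun k => ((hd :: rest).getD k (0, ""), (hd :: rest).getD (k + 1) (0, ""))) := by
  apply List.ext_getElem
  · simp
  · intro i h1 h2
    have hi : i < rest.length := by simpa using h1
    rw [List.getElem_zip, List.getElem_map]
    have hr : (List.range' 0 rest.length)[i]'(by simpa using hi) = i := by
      simpa using List.getElem_range'_1 i (by simpa using hi)
    rw [hr, List.getD_eq_getElem _ _ (by simp; omega),
        List.getD_eq_getElem _ _ (by simp; omega)]
    simp

-- getLast as an indexed access.
lemma pvGetLast_eq_getD (hd : Int × String) (rest : List (Int × String)) :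
    (hd :: rest).getLast (List.cons_ne_nil _ _) = (hd :: rest).getD rest.length (0, "") := by
  rw [List.getLast_eq_getElem, List.getD_eq_getElem _ _ (by simp)]
  congr 1

-- ===== VERDICT (by name: the statement is the Claim_ definition above) =====
theorem tag_insert_join3_spec : Claim_equal_tag_insert_join3 := by
  intro text tag_list _ hpre
  unfold Spec_tag_insert_join3 tag_insert_join3 tag_insert_join3_alt
  cases h : PySem.List.sorted tag_list (fun p => p.1) false with
  | nil => exact absurd ((PySem.List.sorted_eq_nil_iff _ _ _).1 h) hpre
  | cons hd rest =>
    dsimp only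
    rw [show PySem.List.pyGet? (hd :: rest) 0 = some hd by
          simp [PySem.List.pyGet?, PySem.List.pyIdx?]]
    dsimp only
    congr 1
    rw [show (hd :: rest).length = 0 + (rest.length + 1) by simp,
        pvChunk_eq, List.range'_1_concat, List.flatMap_append]
    rw [pvZip_tail_eq_range, List.flatMap_map, pvGetLast_eq_getD]
    simp only [List.flatten_cons, List.flatten_append, List.flatten_nil, List.append_nil]
    rw [pvFlatMap_pair_flatten]
    simp only [List.append_assoc, List.flatMap_cons, List.flatMap_nil, List.append_nil,
      Nat.zero_add]
    congr 1
    congr 1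
    · refine List.flatMap_congr ?_
      intro k hk
      have hk' : k < rest.length := by
        have := List.mem_range'_1.1 hk; omega
      simp only [pvPiece]
      rw [if_pos (by omega)]
    · simp only [pvPiece]
      rw [if_neg (by omega)]
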